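-- pv_equiv track=rewrite | github.com/EthanSchoen/adventCode | days/day10.py | count_diffs
-- ===== SOURCE A (Python) =====
-- def count_diffs(adapters):
--   last = 0
--   res = {'one': 0, 'two': 0, 'three': 0}
--   for a in adapters:
--     if a - last == 1:
--       res['one'] = res['one'] + 1
--     if a - last == 2:
--       res['two'] = res['two'] + 1
--     if a - last == 3:
--       res['three'] = res['three'] + 1
--     last = a
--   return res
-- ===== SOURCE B (Python) =====
-- def count_diffs(adapters):
--   diffs = [cur - prev for prev, cur in zip([0] + list(adapters), adapters)]
--   return {'one': diffs.count(1), 'two': diffs.count(2), 'three': diffs.count(3)}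
-- ===== Notes on version B (the rewrite author's own statement) =====
-- stated objective: idiomatic
-- what changed: B builds the list of consecutive differences (with leading 0) once and reads off the three counts with list.count, replacing A's stateful loop that increments dict entries via three inline branches.
import Mathlib
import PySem

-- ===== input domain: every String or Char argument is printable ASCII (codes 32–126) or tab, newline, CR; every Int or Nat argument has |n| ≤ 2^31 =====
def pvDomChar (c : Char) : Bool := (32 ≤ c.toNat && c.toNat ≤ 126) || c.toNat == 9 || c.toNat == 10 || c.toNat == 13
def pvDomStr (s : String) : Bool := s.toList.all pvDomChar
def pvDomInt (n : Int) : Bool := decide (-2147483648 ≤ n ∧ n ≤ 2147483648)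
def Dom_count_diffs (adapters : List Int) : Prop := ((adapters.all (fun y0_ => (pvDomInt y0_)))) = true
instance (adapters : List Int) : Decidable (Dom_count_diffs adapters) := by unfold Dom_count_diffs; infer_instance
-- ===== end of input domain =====

-- B replaces A's three per-element increment branches with a diff-list built once and three list.count reads (idiomatic; same cost).

-- ===== PORT A =====
-- one loop iteration of A: the three sequential 'if diff == k' dict increments, then last := a
def count_diffs_step (st : PySem.Dict String Int × Int) (a : Int) : PySem.Dict String Int × Int :=
  let res := st.1
  let last := st.2
  let res := if a - last == 1 then res.insert "one" (res.getD "one" 0 + 1) else res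
  let res := if a - last == 2 then res.insert "two" (res.getD "two" 0 + 1) else res
  let res := if a - last == 3 then res.insert "three" (res.getD "three" 0 + 1) else res
  (res, a)

def count_diffs (adapters : List Int) : List (String × Int) :=
  let init : PySem.Dict String Int := PySem.Dict.ofList [("one", 0), ("two", 0), ("three", 0)]
  (adapters.foldl count_diffs_step (init, 0)).1.items

-- ===== PORT B =====
def count_diffs_alt (adapters : List Int) : List (String × Int) :=
  let diffs := ((0 :: adapters).zip adapters).map (fun p => p.2 - p.1)
  [("one", (diffs.count 1 : Int)), ("two", (diffs.count 2 : Int)), ("three", (diffs.count 3 : Int))]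

-- ===== PRECONDITION & SPEC =====
def Spec_count_diffs (adapters : List Int) (out : List (String × Int)) : Prop := out = count_diffs_alt adapters
instance (adapters : List Int) (out : List (String × Int)) : Decidable (Spec_count_diffs adapters out) := by unfold Spec_count_diffs; infer_instance

-- ===== CLAIM (what is proved, stated in full; the proofs are below) =====
def Claim_equal_count_diffs : Prop := ∀ (adapters : List Int), Dom_count_diffs adapters → Spec_count_diffs adapters (count_diffs adapters)

-- ===== LEMMAS AND PROOFS =====

-- loop invariant: A's fold from any 'last' and any counter triple adds exactly B's counts of the remaining diffs
theorem count_diffs_loop (as : List Int) (last o t h : Int) :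
    (as.foldl count_diffs_step (PySem.Dict.mk [("one", o), ("two", t), ("three", h)], last)).1.items
    = [("one", o + ((((last :: as).zip as).map (fun p => p.2 - p.1)).count 1 : Int)),
       ("two", t + ((((last :: as).zip as).map (fun p => p.2 - p.1)).count 2 : Int)),
       ("three", h + ((((last :: as).zip as).map (fun p => p.2 - p.1)).count 3 : Int))] := by
  induction as generalizing last o t h with
  | nil => simp
  | cons a as ih =>
    simp only [List.foldl_cons, count_diffs_step, List.zip_cons_cons, List.map_cons,
      List.count_cons]
    by_cases h1 : a - last = 1 <;> by_cases h2 : a - last = 2 <;> by_cases h3 : a - last = 3 <;>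
      simp [h1, h2, h3, PySem.Dict.insert, PySem.Dict.getD, PySem.Dict.get?, PySem.Dict.contains,
        ih] <;> omega

theorem count_diffs_spec : Claim_equal_count_diffs := by
  intro adapters _
  show count_diffs adapters = count_diffs_alt adapters
  have hinit : PySem.Dict.ofList [("one", (0:Int)), ("two", 0), ("three", 0)]
      = PySem.Dict.mk [("one", 0), ("two", 0), ("three", 0)] := by decide
  simp only [count_diffs, count_diffs_alt, hinit, count_diffs_loop, zero_add]
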